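-- pv_equiv track=rewrite | github.com/algorithm-solving/algorithm-study | 백준/Gold/1700. 멀티탭 스케줄링/멀티탭 스케줄링.py | find_latest
-- ===== SOURCE A (Python) =====
-- def find_latest(stuff_list, plug):
--   latest = -1
--   for i in plug:
--     if i not in stuff_list:
--       return i
--     else:
--       latest = max(latest, stuff_list.index(i))
--   return stuff_list[latest]
-- ===== SOURCE B (Python) =====
-- def find_latest(stuff_list, plug):
--     for i in plug:
--         if i not in stuff_list:
--             return i
--     plugset = set(plug)
--     seen = set()
--     latest = -1
--     for idx, x in enumerate(stuff_list):
--         if x in plugset and x not in seen: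
--             seen.add(x)
--             latest = idx
--     return stuff_list[latest]
-- ===== Notes on version B (the rewrite author's own statement) =====
-- stated objective: alternative
-- what changed: Instead of calling stuff_list.index(i) for every plug item (nested scans), B makes one forward pass over stuff_list with a seen-set, recording the index each time a plug item is first encountered; the last recorded index is the maximum first-occurrence index.
import Mathlib
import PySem

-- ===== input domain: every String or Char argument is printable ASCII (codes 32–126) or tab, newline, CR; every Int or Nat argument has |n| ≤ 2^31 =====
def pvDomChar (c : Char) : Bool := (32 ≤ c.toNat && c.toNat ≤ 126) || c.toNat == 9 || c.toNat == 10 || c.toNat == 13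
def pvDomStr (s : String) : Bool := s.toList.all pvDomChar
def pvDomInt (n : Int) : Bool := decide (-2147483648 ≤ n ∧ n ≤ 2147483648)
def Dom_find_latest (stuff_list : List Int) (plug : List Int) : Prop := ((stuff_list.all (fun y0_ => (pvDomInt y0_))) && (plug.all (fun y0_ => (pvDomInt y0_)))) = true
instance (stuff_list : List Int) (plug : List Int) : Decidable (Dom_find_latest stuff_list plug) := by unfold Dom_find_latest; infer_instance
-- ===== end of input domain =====

-- B replaces A's per-plug-item `.index` scans by a single forward pass over stuff_list
-- with a seen-set recording first occurrences (a single-pass alternative to the nested scans).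

-- ===== PORT A =====
-- the loop `for i in plug: if i not in stuff_list: return i else: latest = max(latest, stuff_list.index(i))`
-- followed by `return stuff_list[latest]`
def findLatestGo (stuff_list : List Int) : List Int → Int → Int
  | [], latest => (PySem.List.pyGet? stuff_list latest).getD 0   -- stuff_list[latest]; none (IndexError) excluded by Pre_
  | i :: rest, latest =>
    if stuff_list.contains i = false then i
    else findLatestGo stuff_list rest
           (max latest (((PySem.List.index? stuff_list i).getD 0 : Nat) : Int))

def find_latest (stuff_list : List Int) (plug : List Int) : Int :=
  findLatestGo stuff_list plug (-1)

-- ===== PORT B =====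
-- `for i in plug: if i not in stuff_list: return i`
def firstAbsent (stuff_list : List Int) : List Int → Option Int
  | [] => none
  | i :: rest => if stuff_list.contains i = false then some i else firstAbsent stuff_list rest

-- `for idx, x in enumerate(stuff_list): if x in plugset and x not in seen: seen.add(x); latest = idx`
def scanLatest (plugset : PySem.Set Int) : List (Int × Int) → PySem.Set Int → Int → Int
  | [], _, latest => latest
  | (idx, x) :: rest, seen, latest =>
    if plugset.contains x && !(seen.contains x) then
      scanLatest plugset rest (PySem.Set.add seen x) idx
    else
      scanLatest plugset rest seen latest

def find_latest_alt (stuff_list : List Int) (plug : List Int) : Int :=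
  match firstAbsent stuff_list plug with
  | some i => i
  | none =>
    let plugset := PySem.Set.ofList plug
    let latest := scanLatest plugset (PySem.List.enumerate stuff_list 0) PySem.Set.empty (-1)
    (PySem.List.pyGet? stuff_list latest).getD 0   -- stuff_list[latest]; none (IndexError) excluded by Pre_

-- ===== PRECONDITION & SPEC =====
-- Python A raises IndexError exactly when both lists are empty (stuff_list[-1] on []); B raises there too.
def Pre_find_latest (stuff_list : List Int) (plug : List Int) : Prop :=
  ¬ (stuff_list = [] ∧ plug = [])
instance (stuff_list : List Int) (plug : List Int) : Decidable (Pre_find_latest stuff_list plug) := by unfold Pre_find_latest; infer_instance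

def pvWitness_find_latest : List Int × List Int := ([2, 3, 2, 7], [3, 7])

def Spec_find_latest (stuff_list : List Int) (plug : List Int) (out : Int) : Prop := out = find_latest_alt stuff_list plug
instance (stuff_list : List Int) (plug : List Int) (out : Int) : Decidable (Spec_find_latest stuff_list plug out) := by unfold Spec_find_latest; infer_instance

-- ===== CLAIM (what is proved, stated in full; the proofs are below) =====
def Claim_equal_find_latest : Prop := ∀ (stuff_list : List Int) (plug : List Int), Dom_find_latest stuff_list plug → Pre_find_latest stuff_list plug → Spec_find_latest stuff_list plug (find_latest stuff_list plug)

-- ===== LEMMAS AND PROOFS =====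

-- first-occurrence index of i in stuff, as an Int (meaningful when i ∈ stuff)
def idxZ (stuff : List Int) (i : Int) : Int :=
  (((PySem.List.index? stuff i).getD 0 : Nat) : Int)

-- A's running maximum, abstracted
def foldlMax (stuff : List Int) (l : List Int) (acc : Int) : Int :=
  l.foldl (fun a i => max a (idxZ stuff i)) acc

theorem idxZ_nonneg (stuff : List Int) (i : Int) : 0 ≤ idxZ stuff i := by
  simp [idxZ]

theorem idxZ_first (done s : List Int) (x : Int) (hx : x ∉ done) :
    idxZ (done ++ x :: s) x = (done.length : Int) := by
  have h : PySem.List.index? (done ++ x :: s) x = some done.length := by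
    rw [PySem.List.index?_eq_some_iff]
    exact ⟨done, s, rfl, rfl, hx⟩
  rw [PySem.List.index?_eq_idxOf?] at h
  simp [idxZ, h]

theorem findLatestGo_eq (stuff : List Int) :
    ∀ (plug : List Int) (latest : Int),
      findLatestGo stuff plug latest =
        match firstAbsent stuff plug with
        | some i => i
        | none => (PySem.List.pyGet? stuff (foldlMax stuff plug latest)).getD 0 := by
  intro plug
  induction plug with
  | nil => intro latest; simp [findLatestGo, firstAbsent, foldlMax]
  | cons i rest ih =>
    intro latest
    by_cases hm : i ∈ stuff
    · simp only [findLatestGo, firstAbsent]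
      rw [if_neg (by simp [hm]), if_neg (by simp [hm]), ih]
      have hfold : foldlMax stuff (i :: rest) latest
          = foldlMax stuff rest (max latest (idxZ stuff i)) := by
        simp [foldlMax]
      rw [hfold]
      simp [idxZ]
    · simp only [findLatestGo, firstAbsent]
      rw [if_pos (by simp [hm]), if_pos (by simp [hm])]

theorem firstAbsent_eq_none_iff (stuff : List Int) (plug : List Int) :
    firstAbsent stuff plug = none ↔ ∀ i ∈ plug, i ∈ stuff := by
  induction plug with
  | nil => simp [firstAbsent]
  | cons i rest ih =>
    by_cases hm : i ∈ stuff
    · simp only [firstAbsent]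
      rw [if_neg (by simp [hm]), ih]
      simp [hm]
    · simp only [firstAbsent]
      rw [if_pos (by simp [hm])]
      simp [hm]

theorem le_foldlMax (stuff : List Int) :
    ∀ (l : List Int) (acc : Int), acc ≤ foldlMax stuff l acc := by
  intro l
  induction l with
  | nil => intro acc; simp [foldlMax]
  | cons i rest ih =>
    intro acc
    calc acc ≤ max acc (idxZ stuff i) := le_max_left _ _
    _ ≤ foldlMax stuff rest (max acc (idxZ stuff i)) := ih _
    _ = foldlMax stuff (i :: rest) acc := by simp [foldlMax]

theorem idxZ_le_foldlMax (stuff : List Int) :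
    ∀ (l : List Int) (acc : Int) (i : Int), i ∈ l → idxZ stuff i ≤ foldlMax stuff l acc := by
  intro l
  induction l with
  | nil => intro acc i h; simp at h
  | cons j rest ih =>
    intro acc i h
    rcases List.mem_cons.mp h with h | h
    · subst h
      calc idxZ stuff i ≤ max acc (idxZ stuff i) := le_max_right _ _
      _ ≤ foldlMax stuff rest _ := le_foldlMax stuff rest _
      _ = foldlMax stuff (i :: rest) acc := by simp [foldlMax]
    · exact ih _ _ h

theorem foldlMax_cases (stuff : List Int) :
    ∀ (l : List Int) (acc : Int),
      foldlMax stuff l acc = acc ∨ ∃ i ∈ l, foldlMax stuff l acc = idxZ stuff i := by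
  intro l
  induction l with
  | nil => intro acc; left; simp [foldlMax]
  | cons j rest ih =>
    intro acc
    have heq : foldlMax stuff (j :: rest) acc = foldlMax stuff rest (max acc (idxZ stuff j)) := by
      simp [foldlMax]
    rcases ih (max acc (idxZ stuff j)) with h | ⟨i, hi, h⟩
    · rcases max_cases acc (idxZ stuff j) with ⟨hm, _⟩ | ⟨hm, _⟩
      · left; rw [heq, h, hm]
      · right; exact ⟨j, List.mem_cons_self, by rw [heq, h, hm]⟩
    · right; exact ⟨i, List.mem_cons_of_mem _ hi, by rw [heq, h]⟩

-- main invariant for B's single pass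
theorem scanLatest_inv (plugset : PySem.Set Int) :
    ∀ (s done : List Int) (seen : PySem.Set Int) (latest : Int),
      (∀ y, y ∈ seen ↔ (y ∈ plugset ∧ y ∈ done)) →
      (∀ y ∈ done, y ∈ plugset → idxZ (done ++ s) y ≤ latest) →
      (latest = -1 ∨ ∃ y ∈ done, y ∈ plugset ∧ latest = idxZ (done ++ s) y) →
      latest < (done.length : Int) →
      (∀ y ∈ done ++ s, y ∈ plugset →
          idxZ (done ++ s) y ≤ scanLatest plugset (PySem.List.enumerate s (done.length : Int)) seen latest) ∧
      (scanLatest plugset (PySem.List.enumerate s (done.length : Int)) seen latest = -1 ∨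
        ∃ y ∈ done ++ s, y ∈ plugset ∧
          scanLatest plugset (PySem.List.enumerate s (done.length : Int)) seen latest = idxZ (done ++ s) y) := by
  intro s
  induction s with
  | nil =>
    intro done seen latest h1 h2 h3 _
    simp only [PySem.List.enumerate_nil, scanLatest]
    exact ⟨by simpa using h2, by simpa using h3⟩
  | cons x s' ih =>
    intro done seen latest h1 h2 h3 h4
    rw [PySem.List.enumerate_cons]
    have hassoc : done ++ x :: s' = (done ++ [x]) ++ s' := by simp
    have hlen : (((done ++ [x]).length : Nat) : Int) = (done.length : Int) + 1 := by
      simp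
    by_cases hc : x ∈ plugset ∧ x ∉ seen
    · -- x is a plug item seen for the first time: record latest := current index
      have hb1 : plugset.contains x = true := (PySem.Set.contains_iff _ _).mpr hc.1
      have hb2 : seen.contains x = false := by
        rw [Bool.eq_false_iff, Ne, PySem.Set.contains_iff]; exact hc.2
      have hcb : (plugset.contains x && !(seen.contains x)) = true := by
        rw [hb1, hb2]; rfl
      simp only [scanLatest, hcb, if_true]
      have hxnd : x ∉ done := fun hmem => hc.2 ((h1 x).mpr ⟨hc.1, hmem⟩)
      have hidx : idxZ (done ++ x :: s') x = (done.length : Int) := idxZ_first done s' x hxnd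
      have main := ih (done ++ [x]) (PySem.Set.add seen x) (done.length : Int)
        (by
          intro y
          rw [PySem.Set.mem_add]
          constructor
          · rintro (hy | rfl)
            · have := (h1 y).mp hy
              exact ⟨this.1, List.mem_append_left _ this.2⟩
            · exact ⟨hc.1, by simp⟩
          · rintro ⟨hpy, hy⟩
            rcases List.mem_append.mp hy with hy | hy
            · exact Or.inl ((h1 y).mpr ⟨hpy, hy⟩)
            · exact Or.inr (by simpa using hy))
        (by
          intro y hy hpy
          rw [← hassoc]
          rcases List.mem_append.mp hy with hy | hy
          · exact le_trans (h2 y hy hpy) (le_of_lt h4)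
          · have : y = x := by simpa using hy
            subst this
            rw [hidx])
        (by
          right
          exact ⟨x, by simp, hc.1, by rw [← hassoc]; exact hidx.symm⟩)
        (by rw [hlen]; omega)
      rw [hlen, ← hassoc] at main
      exact main
    · -- skip: either not a plug item, or already seen
      have hcb : (plugset.contains x && !(seen.contains x)) = false := by
        by_cases hp : x ∈ plugset
        · have hs : x ∈ seen := by
            by_contra hns; exact hc ⟨hp, hns⟩
          have : seen.contains x = true := (PySem.Set.contains_iff _ _).mpr hs
          rw [this]; simp
        · have : plugset.contains x = false := by
            rw [Bool.eq_false_iff, Ne, PySem.Set.contains_iff]; exact hp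
          rw [this]; simp
      simp only [scanLatest, hcb]
      have hkey : x ∈ plugset → x ∈ done := by
        intro hp
        have hs : x ∈ seen := by
          by_contra hns; exact hc ⟨hp, hns⟩
        exact ((h1 x).mp hs).2
      have main := ih (done ++ [x]) seen latest
        (by
          intro y
          rw [h1 y]
          constructor
          · rintro ⟨hpy, hy⟩; exact ⟨hpy, List.mem_append_left _ hy⟩
          · rintro ⟨hpy, hy⟩
            rcases List.mem_append.mp hy with hy | hy
            · exact ⟨hpy, hy⟩
            · have : y = x := by simpa using hy
              subst this
              exact ⟨hpy, hkey hpy⟩)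
        (by
          intro y hy hpy
          rw [← hassoc]
          rcases List.mem_append.mp hy with hy | hy
          · exact h2 y hy hpy
          · have : y = x := by simpa using hy
            subst this
            exact h2 y (hkey hpy) hpy)
        (by
          rcases h3 with h | ⟨y, hy, hpy, h⟩
          · exact Or.inl h
          · exact Or.inr ⟨y, List.mem_append_left _ hy, hpy, by rw [← hassoc]; exact h⟩)
        (by rw [hlen]; omega)
      rw [hlen, ← hassoc] at main
      exact main

theorem scan_eq_fold (stuff : List Int) (plug : List Int)
    (hall : ∀ i ∈ plug, i ∈ stuff) :
    foldlMax stuff plug (-1) =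
      scanLatest (PySem.Set.ofList plug) (PySem.List.enumerate stuff 0) PySem.Set.empty (-1) := by
  set ps := PySem.Set.ofList plug with hps
  have hmem : ∀ y, y ∈ ps ↔ y ∈ plug := by
    intro y; rw [hps, PySem.Set.mem_ofList]
  have inv := scanLatest_inv ps stuff [] PySem.Set.empty (-1)
    (by intro y; simp [PySem.Set.empty])
    (by intro y hy; simp at hy)
    (Or.inl rfl)
    (by simp)
  simp only [List.nil_append, List.length_nil, Int.natCast_zero] at inv
  obtain ⟨hub, hcases⟩ := inv
  set r := scanLatest ps (PySem.List.enumerate stuff 0) PySem.Set.empty (-1) with hr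
  apply le_antisymm
  · -- foldlMax ≤ r
    have hrneg : -1 ≤ r := by
      rcases hcases with h | ⟨y, _, _, h⟩
      · omega
      · rw [h]; have := idxZ_nonneg stuff y; omega
    rcases foldlMax_cases stuff plug (-1) with h | ⟨i, hi, h⟩
    · rw [h]; exact hrneg
    · rw [h]
      exact hub i (hall i hi) ((hmem i).mpr hi)
  · -- r ≤ foldlMax
    rcases hcases with h | ⟨y, hy, hpy, h⟩
    · rw [h]; exact le_foldlMax stuff plug (-1)
    · rw [h]
      exact idxZ_le_foldlMax stuff plug (-1) y ((hmem y).mp hpy)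

-- ===== VERDICT (by name: the statement is the Claim_ definition above) =====
theorem find_latest_spec : Claim_equal_find_latest := by
  intro stuff plug _ _
  unfold Spec_find_latest find_latest find_latest_alt
  rw [findLatestGo_eq]
  cases h : firstAbsent stuff plug with
  | some i => rfl
  | none =>
    simp only
    rw [scan_eq_fold stuff plug ((firstAbsent_eq_none_iff stuff plug).mp h)]
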